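-- pv_equiv track=rewrite | github.com/EldanGS/bversatile | Problems/companies/Jane Street/Programming/Anagrams.py | convert
-- ===== SOURCE A (Python) =====
-- def convert(word):
--     primes = [2, 3, 5, 7, 11, 13, 17, 19, 23, 29, 31, \
--               41, 43, 47, 53, 59, 61, 67, 71, \
--               73, 79, 83, 89, 97, 101, 103
--              ];
--     value = 1
--     for c in word:
--         value *= primes[ord(c) - 97]
--
--     return value
-- ===== SOURCE B (Python) =====
-- def convert(word):
--     primes = [2, 3, 5, 7, 11, 13, 17, 19, 23, 29, 31,
--               41, 43, 47, 53, 59, 61, 67, 71,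
--               73, 79, 83, 89, 97, 101, 103
--              ]
--
--     def prod(chars):
--         # divide-and-conquer product of the per-character primes
--         if not chars:
--             return 1
--         if len(chars) == 1:
--             return primes[ord(chars[0]) - 97]
--         mid = len(chars) // 2
--         return prod(chars[:mid]) * prod(chars[mid:])
--
--     return prod(list(word))
-- ===== Notes on version B (the rewrite author's own statement) =====
-- stated objective: alternative
-- what changed: B computes the hash by divide-and-conquer recursion (split the character list in half, multiply the two sub-products) instead of A's left-to-right loop multiplying one prime per position into an accumulator.
import Mathlib
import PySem

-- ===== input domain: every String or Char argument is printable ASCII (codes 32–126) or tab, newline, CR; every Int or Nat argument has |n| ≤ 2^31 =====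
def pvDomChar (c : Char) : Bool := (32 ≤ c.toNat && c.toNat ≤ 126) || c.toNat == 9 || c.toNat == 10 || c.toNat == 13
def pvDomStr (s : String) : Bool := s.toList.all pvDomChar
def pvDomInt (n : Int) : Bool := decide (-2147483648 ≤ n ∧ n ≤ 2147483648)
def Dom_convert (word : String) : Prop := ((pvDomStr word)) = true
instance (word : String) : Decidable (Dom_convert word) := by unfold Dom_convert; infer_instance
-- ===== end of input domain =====

-- B replaces A's sequential accumulator loop by a divide-and-conquer recursion:
-- split the character list in half and multiply the two sub-products (alternative decomposition).

-- ===== PORT A =====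
-- the literal primes list of the Python source
def pvPrimes : List Int := [2, 3, 5, 7, 11, 13, 17, 19, 23, 29, 31,
  41, 43, 47, 53, 59, 61, 67, 71,
  73, 79, 83, 89, 97, 101, 103]

-- 'value *= primes[ord(c) - 97]' per character; pyGet? wraps negative indices like
-- Python; none = IndexError, which Pre_convert excludes, so the .getD 0 default is never the claimed value
def convert (word : String) : Int :=
  word.toList.foldl (fun value c => value * (PySem.List.pyGet? pvPrimes ((c.toNat : Int) - 97)).getD 0) 1

-- ===== PORT B =====
-- Source B's inner 'prod': empty → 1, singleton → primes[ord(c)-97], else split at len//2 and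
-- multiply the two recursive sub-products. chars[:mid]/chars[mid:] with 0 ≤ mid ≤ len are
-- exactly take/drop (PySem.List.slice_to_natCast / slice_from_natCast).
def pvProd (l : List Char) : Int :=
  match l with
  | [] => 1
  | [c] => (PySem.List.pyGet? pvPrimes ((c.toNat : Int) - 97)).getD 0
  | c1 :: c2 :: rest =>
      pvProd ((c1 :: c2 :: rest).take ((c1 :: c2 :: rest).length / 2))
        * pvProd ((c1 :: c2 :: rest).drop ((c1 :: c2 :: rest).length / 2))
  termination_by l.length
  decreasing_by
    · simp [List.length_take]; omega
    · simp; omega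

def convert_alt (word : String) : Int := pvProd word.toList

-- ===== PRECONDITION & SPEC =====
-- Pre_: exactly the inputs where A returns normally; a char with code < 71 or > 122 makes
-- primes[ord(c)-97] an IndexError in Python (negative indices down to -26 wrap).
def Pre_convert (word : String) : Prop :=
  word.toList.all (fun c => 71 ≤ c.toNat && c.toNat ≤ 122) = true
instance (word : String) : Decidable (Pre_convert word) := by unfold Pre_convert; infer_instance
def pvWitness_convert : String := "anagram"
def Spec_convert (word : String) (out : Int) : Prop := out = convert_alt word
instance (word : String) (out : Int) : Decidable (Spec_convert word out) := by unfold Spec_convert; infer_instance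

-- ===== CLAIM (what is proved, stated in full; the proofs are below) =====
def Claim_equal_convert : Prop := ∀ (word : String), Dom_convert word → Pre_convert word → Spec_convert word (convert word)

-- ===== LEMMAS AND PROOFS =====

-- the per-character factor both ports compute
def pvP (c : Char) : Int := (PySem.List.pyGet? pvPrimes ((c.toNat : Int) - 97)).getD 0

theorem pvA_eq (l : List Char) :
    l.foldl (fun value c => value * pvP c) 1 = (l.map pvP).prod := by
  rw [List.prod_eq_foldl, List.foldl_map]

theorem pvB_eq (l : List Char) : pvProd l = (l.map pvP).prod := by
  induction l using pvProd.induct with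
  | case1 => simp [pvProd]
  | case2 c => simp [pvProd, pvP]
  | case3 c1 c2 rest ih1 ih2 =>
      rw [pvProd, ih1, ih2, ← List.prod_append, ← List.map_append, List.take_append_drop]

-- ===== VERDICT (by name: the statement is the Claim_ definition above) =====
theorem convert_spec : Claim_equal_convert := by
  intro word _ _
  show convert word = convert_alt word
  unfold convert convert_alt
  rw [show (fun (value : Int) (c : Char) => value * (PySem.List.pyGet? pvPrimes ((c.toNat : Int) - 97)).getD 0)
        = (fun value c => value * pvP c) from rfl,
      pvA_eq, pvB_eq]
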